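-- pv_equiv track=rewrite | github.com/Sk0uF/Algorithms | py_algo/sorting/quick_sort/prom_night.py | quicky_sort
-- ===== SOURCE A (Python) =====
-- def quicky_sort(array, boys):
--     pivot = boys[0]
--     left = []
--     right = []
--     for i in range(len(array)):
--         if array[i] < pivot:
--             left.append(array[i])
--         else:
--             right.append(array[i])
--
--     temp_len = len(left)
--     if temp_len == 0:
--         return False
--
--     if len(boys) <= temp_len:
--         return True
--
--     return quicky_sort(right, boys[temp_len:])
-- ===== SOURCE B (Python) =====
-- def quicky_sort(array, boys):
--     # Sort once, then sweep: each round consumes the prefix of remaining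
--     # sorted values below the current pivot instead of re-partitioning.
--     arr = sorted(array)
--     while True:
--         pivot = boys[0]
--         hi = 0
--         while hi < len(arr) and arr[hi] < pivot:
--             hi += 1
--         if hi == 0:
--             return False
--         if len(boys) <= hi:
--             return True
--         arr = arr[hi:]
--         boys = boys[hi:]
-- ===== Notes on version B (the rewrite author's own statement) =====
-- stated objective: alternative
-- what changed: B sorts the array once and sweeps it left-to-right, consuming per round the prefix of remaining sorted values below the current pivot, instead of re-partitioning the whole remaining array at every recursion level; worst case O(n log n + k) vs A's O(n*k), but not measurably faster on random inputs.
import Mathlib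
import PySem

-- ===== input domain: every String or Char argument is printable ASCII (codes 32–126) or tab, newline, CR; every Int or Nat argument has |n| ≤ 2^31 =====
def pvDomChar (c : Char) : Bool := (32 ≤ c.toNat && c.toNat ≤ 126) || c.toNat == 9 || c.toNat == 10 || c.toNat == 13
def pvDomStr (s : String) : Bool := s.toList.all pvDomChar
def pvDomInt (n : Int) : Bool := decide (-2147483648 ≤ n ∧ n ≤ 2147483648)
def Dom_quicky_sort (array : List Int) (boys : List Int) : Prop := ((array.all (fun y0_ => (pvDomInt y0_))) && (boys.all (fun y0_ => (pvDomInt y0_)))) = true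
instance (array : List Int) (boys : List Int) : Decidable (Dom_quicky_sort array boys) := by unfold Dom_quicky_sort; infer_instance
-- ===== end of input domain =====

-- B sorts the array once and sweeps it left-to-right, consuming per round the prefix
-- of remaining values below the current pivot, instead of re-partitioning each round
-- (objective: alternative).


-- ===== PORT A =====
-- 'for i in range(len(array)): append to left/right' ported as a foldl over the (left, right) pair;
-- 'boys[temp_len:]' with temp_len ≥ 0 is List.drop.
def quicky_sort (array : List Int) (boys : List Int) : Bool :=
  match boys with
  | [] => false  -- 'boys[0]' raises IndexError in Python; excluded by Pre_quicky_sort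
  | pivot :: rest =>
      match array.foldl (fun (lr : List Int × List Int) x =>
        if x < pivot then (lr.1 ++ [x], lr.2) else (lr.1, lr.2 ++ [x])) ([], []) with
      | (left, right) =>
        if left.length = 0 then false
        else if rest.length + 1 ≤ left.length then true
        else quicky_sort right ((pivot :: rest).drop left.length)
termination_by boys.length
decreasing_by simp only [List.length_drop, List.length_cons]; omega

-- ===== PORT B =====
-- port of the inner 'while hi < len(arr) and arr[hi] < pivot: hi += 1'
def pvCountLt : List Int → Int → Nat
  | [], _ => 0
  | x :: xs, p => if x < p then pvCountLt xs p + 1 else 0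

-- port of the outer 'while True' loop of Source B ('arr = arr[hi:]; boys = boys[hi:]' = drop)
def pvAltGo : List Int → List Int → Bool
  | _, [] => false  -- 'boys[0]' raises IndexError in Python; excluded by Pre_quicky_sort
  | arr, pivot :: rest =>
      let hi := pvCountLt arr pivot
      if hi = 0 then false
      else if rest.length + 1 ≤ hi then true
      else pvAltGo (arr.drop hi) ((pivot :: rest).drop hi)
termination_by _ boys => boys.length
decreasing_by simp_all; omega

def quicky_sort_alt (array : List Int) (boys : List Int) : Bool :=
  pvAltGo (PySem.List.sorted array (fun x => x) false) boys

-- ===== PRECONDITION & SPEC =====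
-- Both Pythons raise IndexError on boys = [] ('boys[0]'); excluded.
def Pre_quicky_sort (array : List Int) (boys : List Int) : Prop := boys ≠ []
instance (array : List Int) (boys : List Int) : Decidable (Pre_quicky_sort array boys) := by unfold Pre_quicky_sort; infer_instance
def pvWitness_quicky_sort : List Int × List Int := ([3, 1, 2], [2, 4])

def Spec_quicky_sort (array : List Int) (boys : List Int) (out : Bool) : Prop := out = quicky_sort_alt array boys
instance (array : List Int) (boys : List Int) (out : Bool) : Decidable (Spec_quicky_sort array boys out) := by unfold Spec_quicky_sort; infer_instance

-- ===== CLAIM (what is proved, stated in full; the proofs are below) =====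
def Claim_equal_quicky_sort : Prop := ∀ (array : List Int) (boys : List Int), Dom_quicky_sort array boys → Pre_quicky_sort array boys → Spec_quicky_sort array boys (quicky_sort array boys)

-- ===== LEMMAS AND PROOFS =====

-- A's append loop builds exactly the two order-preserving filters.
lemma pv_foldl_partition (p : Int) (array l r : List Int) :
    array.foldl (fun (lr : List Int × List Int) x =>
        if x < p then (lr.1 ++ [x], lr.2) else (lr.1, lr.2 ++ [x])) (l, r)
      = (l ++ array.filter (fun x => decide (x < p)),
         r ++ array.filter (fun x => !decide (x < p))) := by
  induction array generalizing l r with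
  | nil => simp
  | cons x xs ih =>
      by_cases h : x < p <;> simp [h, ih]

-- on a ≤-sorted list the leading-run count below p is the number of elements below p
lemma pv_countLt_eq (p : Int) (arr : List Int) (hs : arr.Pairwise (· ≤ ·)) :
    pvCountLt arr p = (arr.filter (fun x => decide (x < p))).length := by
  induction arr with
  | nil => simp [pvCountLt]
  | cons x xs ih =>
      rcases List.pairwise_cons.mp hs with ⟨hx, hxs⟩
      by_cases h : x < p
      · simp [pvCountLt, h, ih hxs]
      · have : ∀ y ∈ xs, ¬ y < p := fun y hy => by
          have := hx y hy; omega
        have hnil : xs.filter (fun x => decide (x < p)) = [] :=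
          List.filter_eq_nil_iff.mpr (fun y hy => by simpa using this y hy)
        simp [pvCountLt, h, hnil]

-- on a ≤-sorted list, dropping that count leaves exactly the elements ≥ p
lemma pv_drop_countLt (p : Int) (arr : List Int) (hs : arr.Pairwise (· ≤ ·)) :
    arr.drop (pvCountLt arr p) = arr.filter (fun x => !decide (x < p)) := by
  induction arr with
  | nil => simp [pvCountLt]
  | cons x xs ih =>
      rcases List.pairwise_cons.mp hs with ⟨hx, hxs⟩
      by_cases h : x < p
      · simp [pvCountLt, h, ih hxs]
      · have : ∀ y ∈ xs, ¬ y < p := fun y hy => by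
          have := hx y hy; omega
        simp [pvCountLt, h]
        exact (List.filter_eq_self.mpr (fun y hy => by simpa using this y hy)).symm

-- main invariant: A on any list = B's loop on a sorted permutation of it
lemma pv_main (n : Nat) : ∀ (boys : List Int), boys.length ≤ n →
    ∀ (array arr : List Int), arr.Perm array → arr.Pairwise (· ≤ ·) →
      quicky_sort array boys = pvAltGo arr boys := by
  induction n with
  | zero =>
      intro boys hb array arr _ _
      have : boys = [] := List.length_eq_zero_iff.mp (Nat.le_zero.mp hb)
      subst this; rw [quicky_sort.eq_def, pvAltGo.eq_def]
  | succ n ih =>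
      intro boys hb array arr hperm hsort
      match boys with
      | [] => rw [quicky_sort.eq_def, pvAltGo.eq_def]
      | pivot :: rest =>
        rw [quicky_sort.eq_def, pvAltGo.eq_def]
        have hcnt : pvCountLt arr pivot = (array.filter (fun x => decide (x < pivot))).length := by
          rw [pv_countLt_eq pivot arr hsort]
          exact (hperm.filter _).length_eq
        simp only [pv_foldl_partition, List.nil_append]
        rw [hcnt]
        by_cases h0 : (array.filter (fun x => decide (x < pivot))).length = 0
        · simp [h0]
        · simp only [h0, if_false]
          by_cases h1 : rest.length + 1 ≤ (array.filter (fun x => decide (x < pivot))).length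
          · simp [h1]
          · simp only [h1, if_false]
            apply ih
            · have h2 : 1 ≤ (array.filter (fun x => decide (x < pivot))).length :=
                Nat.one_le_iff_ne_zero.mpr h0
              simp only [List.length_drop, List.length_cons]
              simp only [List.length_cons] at hb
              omega
            · rw [← hcnt, pv_drop_countLt pivot arr hsort]
              exact hperm.filter _
            · exact hsort.sublist (List.drop_sublist _ _)

theorem pv_sorted_perm_pairwise (array : List Int) :
    (PySem.List.sorted array (fun x => x) false).Perm array ∧
    (PySem.List.sorted array (fun x => x) false).Pairwise (· ≤ ·) := by
  refine ⟨PySem.List.sorted_perm array (fun x => x) false, ?_⟩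
  simpa using PySem.List.sorted_pairwise array (fun x => x)

-- ===== VERDICT (by name: the statement is the Claim_ definition above) =====
theorem quicky_sort_spec : Claim_equal_quicky_sort := by
  intro array boys _ _
  unfold Spec_quicky_sort quicky_sort_alt
  obtain ⟨h1, h2⟩ := pv_sorted_perm_pairwise array
  exact pv_main boys.length boys le_rfl array _ h1 h2
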